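-- pv_equiv track=rewrite | github.com/JoshAugust/Enrichment | cleanup_v2.py | is_insurance_agency
-- ===== SOURCE A (Python) =====
-- def is_insurance_agency(company_name, specialization, agent_notes):
--     """Quick check if this looks like a legitimate insurance agency"""
--     name_lower = company_name.lower()
--     spec_lower = specialization.lower() if specialization else ""
--     notes_lower = agent_notes.lower() if agent_notes else ""
--
--     insurance_keywords = [
--         "insurance", "ins ", "ins.", "insurers", "insurer",
--         "broker", "brokerage", "underwriter", "underwriting",
--         "mga ", "mgs ", "mgu ", "surplus lines", "excess lines",
--         "independent agent", "independent agency", "p&c",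
--         "casualty", "liability coverage", "policy",
--         "trucking insurance", "commercial auto insurance",
--     ]
--
--     for kw in insurance_keywords:
--         if kw in name_lower or kw in spec_lower:
--             return True
--
--     return False
-- ===== SOURCE B (Python) =====
-- _INSURANCE_KEYWORDS = [
--     "insurance", "ins ", "ins.", "insurers", "insurer",
--     "broker", "brokerage", "underwriter", "underwriting",
--     "mga ", "mgs ", "mgu ", "surplus lines", "excess lines",
--     "independent agent", "independent agency", "p&c",
--     "casualty", "liability coverage", "policy",
--     "trucking insurance", "commercial auto insurance",
-- ]
--
--
-- def _scan(text):
--     # explicit position-by-position prefix scan instead of per-keyword 'in'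
--     return any(
--         text.startswith(kw, i)
--         for i in range(len(text))
--         for kw in _INSURANCE_KEYWORDS
--     )
--
--
-- def is_insurance_agency(company_name, specialization, agent_notes):
--     name_lower = company_name.lower()
--     spec_lower = specialization.lower() if specialization else ""
--     return _scan(name_lower) or _scan(spec_lower)
-- ===== Notes on version B (the rewrite author's own statement) =====
-- stated objective: alternative
-- what changed: A tests each keyword against both strings with Python's substring operator; B walks every starting position of each string once and tests which keyword is a prefix there (an explicit naive substring scan per string, combined with a plain or).
import Mathlib
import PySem

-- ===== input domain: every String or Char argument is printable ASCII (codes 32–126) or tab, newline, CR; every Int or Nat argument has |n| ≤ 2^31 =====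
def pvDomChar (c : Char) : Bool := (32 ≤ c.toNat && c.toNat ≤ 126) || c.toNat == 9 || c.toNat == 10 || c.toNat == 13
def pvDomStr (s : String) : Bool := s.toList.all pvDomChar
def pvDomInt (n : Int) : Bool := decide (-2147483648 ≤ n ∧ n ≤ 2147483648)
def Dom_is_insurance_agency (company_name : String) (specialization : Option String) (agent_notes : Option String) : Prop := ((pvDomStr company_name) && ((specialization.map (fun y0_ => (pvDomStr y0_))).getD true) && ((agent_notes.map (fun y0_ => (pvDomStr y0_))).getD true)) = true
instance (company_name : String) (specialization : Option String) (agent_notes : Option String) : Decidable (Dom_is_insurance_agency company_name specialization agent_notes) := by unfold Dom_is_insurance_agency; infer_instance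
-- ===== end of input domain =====

-- B replaces A's per-keyword substring test by an explicit position-by-position prefix
-- scan of each string (objective: an alternative algorithm of similar cost).

-- ===== PORT A =====
def is_insurance_agency (company_name : String) (specialization : Option String) (agent_notes : Option String) : Bool :=
  let name_lower := PySem.Str.lower company_name
  let spec_lower := match specialization with
    | some s => if s = "" then "" else PySem.Str.lower s   -- 'specialization.lower() if specialization else ""' (None and "" are falsy)
    | none => ""
  let _notes_lower := match agent_notes with
    | some s => if s = "" then "" else PySem.Str.lower s
    | none => ""
  let insurance_keywords : List String :=
    ["insurance", "ins ", "ins.", "insurers", "insurer",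
     "broker", "brokerage", "underwriter", "underwriting",
     "mga ", "mgs ", "mgu ", "surplus lines", "excess lines",
     "independent agent", "independent agency", "p&c",
     "casualty", "liability coverage", "policy",
     "trucking insurance", "commercial auto insurance"]
  insurance_keywords.any (fun kw => PySem.Str.isIn kw name_lower || PySem.Str.isIn kw spec_lower)

-- ===== PORT B =====
def pvInsuranceKeywords : List String :=
  ["insurance", "ins ", "ins.", "insurers", "insurer",
   "broker", "brokerage", "underwriter", "underwriting",
   "mga ", "mgs ", "mgu ", "surplus lines", "excess lines",
   "independent agent", "independent agency", "p&c",
   "casualty", "liability coverage", "policy",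
   "trucking insurance", "commercial auto insurance"]

-- _scan: 'any(text.startswith(kw, i) for i in range(len(text)) for kw in keywords)';
-- text.startswith(kw, i) is ported exactly as startswith on text.drop i (0 ≤ i < len).
def pvScan (text : List Char) : Bool :=
  (List.range text.length).any (fun i =>
    pvInsuranceKeywords.any (fun kw => PySem.Chars.startswith (text.drop i) kw.toList))

def is_insurance_agency_alt (company_name : String) (specialization : Option String) (agent_notes : Option String) : Bool :=
  let name_lower := PySem.Str.lower company_name
  let spec_lower := match specialization with
    | some s => if s = "" then "" else PySem.Str.lower s
    | none => ""
  pvScan name_lower.toList || pvScan spec_lower.toList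

-- ===== PRECONDITION & SPEC =====
def Spec_is_insurance_agency (company_name : String) (specialization : Option String) (agent_notes : Option String) (out : Bool) : Prop := out = is_insurance_agency_alt company_name specialization agent_notes
instance (company_name : String) (specialization : Option String) (agent_notes : Option String) (out : Bool) : Decidable (Spec_is_insurance_agency company_name specialization agent_notes out) := by unfold Spec_is_insurance_agency; infer_instance

-- ===== CLAIM (what is proved, stated in full; the proofs are below) =====
def Claim_equal_is_insurance_agency : Prop := ∀ (company_name : String) (specialization : Option String) (agent_notes : Option String), Dom_is_insurance_agency company_name specialization agent_notes → Spec_is_insurance_agency company_name specialization agent_notes (is_insurance_agency company_name specialization agent_notes)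

-- ===== LEMMAS AND PROOFS =====

theorem pvKeywords_nonempty : ∀ kw ∈ pvInsuranceKeywords, kw.toList ≠ [] := by decide

-- the position scan over a string finds exactly the keywords that occur as substrings
theorem pvScan_eq (cs : List Char) :
    pvScan cs = pvInsuranceKeywords.any (fun kw => PySem.Chars.isIn kw.toList cs) := by
  unfold pvScan
  rcases h : pvInsuranceKeywords.any (fun kw => PySem.Chars.isIn kw.toList cs) with _ | _
  · -- no keyword occurs: no position can start one
    simp only [List.any_eq_false] at h ⊢
    intro i _
    simp only [List.any_eq_true, not_exists]
    rintro kw ⟨hkw, hpre⟩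
    exact h kw hkw
      ((PySem.Chars.exists_prefix_drop_iff_isIn kw.toList cs).mp
        ⟨i, (PySem.Chars.startswith_iff _ _).mp hpre⟩)
  · -- some keyword occurs: its first position is inside range(len)
    simp only [List.any_eq_true] at h ⊢
    obtain ⟨kw, hkw, hin⟩ := h
    obtain ⟨j, hj⟩ := (PySem.Chars.exists_prefix_drop_iff_isIn kw.toList cs).mpr hin
    have hjlt : j < cs.length := by
      by_contra hge
      have : cs.drop j = [] := List.drop_eq_nil_of_le (le_of_not_gt hge)
      rw [this] at hj
      exact pvKeywords_nonempty kw hkw (List.prefix_nil.mp hj)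
    exact ⟨j, List.mem_range.mpr hjlt, kw, hkw,
      (PySem.Chars.startswith_iff _ _).mpr hj⟩

theorem pv_any_or {α : Type} (l : List α) (p q : α → Bool) :
    l.any (fun x => p x || q x) = (l.any p || l.any q) := by
  induction l with
  | nil => rfl
  | cons x xs ih =>
    simp only [List.any_cons, ih]
    cases p x <;> cases q x <;> simp

-- ===== VERDICT (by name: the statement is the Claim_ definition above) =====
theorem is_insurance_agency_spec : Claim_equal_is_insurance_agency := by
  intro company_name specialization agent_notes _
  unfold Spec_is_insurance_agency is_insurance_agency is_insurance_agency_alt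
  simp only [pvScan_eq, pv_any_or]
  congr 1
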